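-- pv_equiv track=rewrite | github.com/yuval-olshaker/TransCoder | slice_python_code.py | close_branches
-- ===== SOURCE A (Python) =====
-- INDENTATION = 4
--
-- CLOSE_SPECIAL_BRACKET = '}'
--
-- SPACE = ' '
--
-- def close_branches(opened_indentations, ind, finish_lines):
--     need_to_close = []
--     for num in opened_indentations:
--         if num >= ind:
--             need_to_close.append(num)
--     if need_to_close:  # if we need to close
--         need_to_close.sort()
--         need_to_close.reverse()  # we sort and reverse, because we need to close the "bigger" indentations first
--         for num in need_to_close:
--             finish_lines.append((SPACE * INDENTATION * num) + CLOSE_SPECIAL_BRACKET)  # close with indentation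
--             opened_indentations.remove(num) # we close it
--     return finish_lines, opened_indentations
-- ===== SOURCE B (Python) =====
-- INDENTATION = 4
--
-- CLOSE_SPECIAL_BRACKET = '}'
--
-- SPACE = ' '
--
-- def close_branches(opened_indentations, ind, finish_lines):
--     # Single pass partition + one descending sort; no repeated list.remove scans.
--     # Note: like A it appends to finish_lines in place, but it does not mutate
--     # opened_indentations (the return value is what is claimed equal).
--     keep = [num for num in opened_indentations if num < ind]
--     for num in sorted((num for num in opened_indentations if num >= ind), reverse=True):
--         finish_lines.append(SPACE * INDENTATION * num + CLOSE_SPECIAL_BRACKET)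
--     return finish_lines, keep
-- ===== Notes on version B (the rewrite author's own statement) =====
-- stated objective: alternative
-- what changed: Replaces the collect-then-remove loop (each iteration calling list.remove, an O(n) scan of the remaining opened list) by a single-pass partition into keep/close lists plus one descending sort of the closed ones; timing did not confirm a speed-up since building the close-line strings dominates both.
import Mathlib
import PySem

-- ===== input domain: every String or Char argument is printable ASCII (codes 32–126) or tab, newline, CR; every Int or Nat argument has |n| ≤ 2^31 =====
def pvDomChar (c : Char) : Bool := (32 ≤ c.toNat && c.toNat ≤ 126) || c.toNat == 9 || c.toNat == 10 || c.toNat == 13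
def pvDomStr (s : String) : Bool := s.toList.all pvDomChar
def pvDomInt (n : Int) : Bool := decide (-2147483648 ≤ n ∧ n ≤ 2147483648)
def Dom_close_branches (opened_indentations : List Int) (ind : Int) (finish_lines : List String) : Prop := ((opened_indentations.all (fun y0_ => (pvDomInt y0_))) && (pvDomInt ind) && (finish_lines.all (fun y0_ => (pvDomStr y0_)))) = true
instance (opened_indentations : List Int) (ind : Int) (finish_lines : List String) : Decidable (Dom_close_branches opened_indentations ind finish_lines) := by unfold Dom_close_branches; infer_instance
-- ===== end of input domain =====

-- B replaces A's per-element list.remove scans by one partition pass plus one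
-- descending sort (an alternative decomposition); equality is about the RETURN
-- value: both append to finish_lines, but B does not mutate opened_indentations
-- in place while A does.

-- ===== PORT A =====
-- SPACE * INDENTATION * num + CLOSE_SPECIAL_BRACKET: 4*num spaces (empty for num ≤ 0,
-- exactly Python's negative string repetition) followed by '}'
def pvLineA (num : Int) : String :=
  String.ofList (List.replicate ((4 * num).toNat) ' ') ++ "}"

def close_branches (opened_indentations : List Int) (ind : Int) (finish_lines : List String) : List String × List Int :=
  let need_to_close :=
    opened_indentations.foldl (fun acc num => if ind ≤ num then acc ++ [num] else acc) ([] : List Int)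
  if need_to_close ≠ [] then
    -- sort() then reverse() in place
    let ys := (PySem.List.sorted need_to_close (fun x => x) false).reverse
    -- loop body: finish_lines.append(line); opened_indentations.remove(num)
    -- (num is always present, so Python's remove never raises; getD is exact here)
    ys.foldl
      (fun st num => (st.1 ++ [pvLineA num], (PySem.List.remove? st.2 num).getD st.2))
      (finish_lines, opened_indentations)
  else
    (finish_lines, opened_indentations)

-- ===== PORT B =====
def close_branches_alt (opened_indentations : List Int) (ind : Int) (finish_lines : List String) : List String × List Int :=
  let keep := opened_indentations.filter (fun num => decide (num < ind))
  let closes := PySem.List.sorted (opened_indentations.filter (fun num => decide (ind ≤ num))) (fun x => x) true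
  (closes.foldl (fun acc num => acc ++ [String.ofList (List.replicate ((4 * num).toNat) ' ') ++ "}"]) finish_lines, keep)

-- ===== PRECONDITION & SPEC =====
def Spec_close_branches (opened_indentations : List Int) (ind : Int) (finish_lines : List String) (out : List String × List Int) : Prop := out = close_branches_alt opened_indentations ind finish_lines
instance (opened_indentations : List Int) (ind : Int) (finish_lines : List String) (out : List String × List Int) : Decidable (Spec_close_branches opened_indentations ind finish_lines out) := by unfold Spec_close_branches; infer_instance

-- ===== CLAIM (what is proved, stated in full; the proofs are below) =====
def Claim_equal_close_branches : Prop := ∀ (opened_indentations : List Int) (ind : Int) (finish_lines : List String), Dom_close_branches opened_indentations ind finish_lines → Spec_close_branches opened_indentations ind finish_lines (close_branches opened_indentations ind finish_lines)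

-- ===== LEMMAS AND PROOFS =====

-- erasing a p-element commutes with filtering by p
theorem pv_filter_erase_pos (p : Int → Bool) (v : Int) (hv : p v = true) :
    ∀ xs : List Int, (xs.erase v).filter p = (xs.filter p).erase v := by
  intro xs
  induction xs with
  | nil => simp
  | cons x t ih =>
    by_cases hx : x = v
    · subst hx
      simp [List.erase_cons_head, hv]
    · have hbx : ¬ (x == v) = true := by simp [hx]
      rw [List.erase_cons_tail hbx]
      by_cases hp : p x = true
      · rw [List.filter_cons_of_pos hp, List.filter_cons_of_pos hp,
            List.erase_cons_tail hbx, ih]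
      · rw [List.filter_cons_of_neg (by simp [hp]), List.filter_cons_of_neg (by simp [hp]), ih]

-- erasing a p-element does not change the ¬p-part
theorem pv_filter_erase_neg (p : Int → Bool) (v : Int) (hv : p v = true) :
    ∀ xs : List Int, (xs.erase v).filter (fun a => !p a) = xs.filter (fun a => !p a) := by
  intro xs
  induction xs with
  | nil => simp
  | cons x t ih =>
    by_cases hx : x = v
    · subst hx
      simp [List.erase_cons_head, hv]
    · rw [List.erase_cons_tail (by simp [hx])]
      simp [List.filter_cons, ih]

-- removing (first occurrence of) each element of a permutation of the p-part
-- leaves exactly the ¬p-part, in order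
theorem pv_foldl_remove (p : Int → Bool) :
    ∀ (ys xs : List Int), ys.Perm (xs.filter p) →
      ys.foldl (fun l v => (PySem.List.remove? l v).getD l) xs = xs.filter (fun a => !p a) := by
  intro ys
  induction ys with
  | nil =>
    intro xs hperm
    have h0 : xs.filter p = [] := (List.Perm.nil_eq hperm).symm
    have : ∀ a ∈ xs, ¬ p a = true := List.filter_eq_nil_iff.mp h0
    simp only [List.foldl_nil]
    rw [List.filter_eq_self.mpr]
    intro a ha
    simp [this a ha]
  | cons v ys' ih =>
    intro xs hperm
    have hvmem : v ∈ xs.filter p := hperm.mem_iff.mp (by simp)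
    have hv : p v = true := (List.mem_filter.mp hvmem).2
    have hvxs : v ∈ xs := (List.mem_filter.mp hvmem).1
    have hrem : (PySem.List.remove? xs v).getD xs = xs.erase v := by
      rw [PySem.List.remove?_eq_some_erase xs v hvxs]; rfl
    have hperm' : ys'.Perm ((xs.erase v).filter p) := by
      have h1 : ((v :: ys').erase v).Perm ((xs.filter p).erase v) := hperm.erase v
      rw [List.erase_cons_head] at h1
      rw [pv_filter_erase_pos p v hv xs]
      exact h1
    simp only [List.foldl_cons, hrem]
    rw [ih (xs.erase v) hperm', pv_filter_erase_neg p v hv xs]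

-- reverse of the ascending sort IS the descending sort (Int values, identity key)
theorem pv_rev_sorted (l : List Int) :
    (PySem.List.sorted l (fun x => x) false).reverse = PySem.List.sorted l (fun x => x) true := by
  apply PySem.List.eq_of_perm_of_pairwise_le_of_injective (key := fun x : Int => -x)
  · intro a b h; simpa using h
  · exact ((List.reverse_perm _).trans (PySem.List.sorted_perm l (fun x => x) false)).trans
      (PySem.List.sorted_perm l (fun x => x) true).symm
  · rw [List.pairwise_reverse]
    have := PySem.List.sorted_pairwise l (fun x => x)
    exact this.imp (by intro a b h; simpa using h)
  · have := PySem.List.sorted_pairwise_rev l (fun x => x)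
    exact this.imp (by intro a b h; simpa using h)

-- ===== VERDICT (by name: the statement is the Claim_ definition above) =====
theorem close_branches_spec : Claim_equal_close_branches := by
  intro xs ind fl _
  unfold Spec_close_branches close_branches close_branches_alt
  have hntc : xs.foldl (fun acc num => if ind ≤ num then acc ++ [num] else acc) ([] : List Int)
      = xs.filter (fun num => decide (ind ≤ num)) := by
    have := PySem.List.foldl_append_if (fun num : Int => decide (ind ≤ num)) id xs []
    simpa using this
  simp only [hntc]
  by_cases hne : xs.filter (fun num => decide (ind ≤ num)) = []
  · -- nothing to close: sorted [] = [], and every element of xs is < ind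
    have hall : ∀ a ∈ xs, ¬ (decide (ind ≤ a) = true) := List.filter_eq_nil_iff.mp hne
    have hkeep : xs.filter (fun num => decide (num < ind)) = xs := by
      rw [List.filter_eq_self]
      intro a ha
      have := hall a ha
      simp only [decide_eq_true_eq] at this ⊢
      omega
    simp [hne, hkeep]
  · simp only [if_pos (by exact hne)]
    rw [pv_rev_sorted]
    set ys := PySem.List.sorted (xs.filter (fun num => decide (ind ≤ num))) (fun x => x) true with hys
    rw [PySem.List.foldl_prod_mk (fun s num => s ++ [pvLineA num])
        (fun s num => (PySem.List.remove? s num).getD s) ys fl xs]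
    have hperm : ys.Perm (xs.filter (fun num => decide (ind ≤ num))) :=
      PySem.List.sorted_perm _ _ _
    rw [pv_foldl_remove (fun num => decide (ind ≤ num)) ys xs hperm]
    rw [PySem.List.foldl_append_singleton_eq_map pvLineA ys fl,
        PySem.List.foldl_append_singleton_eq_map
          (fun num => String.ofList (List.replicate ((4 * num).toNat) ' ') ++ "}") ys fl]
    have : xs.filter (fun a => !decide (ind ≤ a)) = xs.filter (fun num => decide (num < ind)) := by
      apply List.filter_congr
      intro a _
      by_cases h : ind ≤ a
      · simp [h, not_lt.mpr h]
      · simp [h, lt_of_not_ge h]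
    rw [this]
    rfl
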